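-- pv_equiv track=rewrite | github.com/yaromochka/DSTU | PythonLang/FormalLang/secondLaboratory/unreachable_symbols.py | delete_unreachable_symbols
-- ===== SOURCE A (Python) =====
-- from typing import AnyStr, Generator, Any
--
-- def _processing_terminal_values(grammar_inner: dict[str, list[str]], symbol: str) -> Generator[str, Any, None]:
--     """
--     Обработка терминальных значений перед добавлением в стек
--     """
--     if symbol in grammar_inner:
--         yield from (char for production in grammar_inner[symbol] for char in production if char.isupper())
--
-- def delete_unreachable_symbols(grammar: dict[str, list[str]]) -> dict[str, list[str]]:
--     start_symbol = next(iter(grammar))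
--
--     # Множество достижимых символов
--     reachable = set()
--     # Стек для обхода символов
--     stack = [start_symbol]
--
--     while stack:
--         symbol = stack.pop()
--         if symbol not in reachable:
--             reachable.add(symbol)
--             # Обработка терминальных значений перед добавлением в стек
--             if terminal_values := _processing_terminal_values(grammar_inner=grammar, symbol=symbol):
--                 stack.extend(terminal_values)
--
--     new_grammar: dict[str, list[str]] = {}
--     for symbol, productions in grammar.items():
--         if symbol in reachable:
--             new_productions: list[str] = []
--             for production in productions:
--                 # Включаем только те продукции, которые содержат достижимые символы
--                 if all(char in reachable or not char.isupper() for char in production):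
--                     new_productions.append(production)
--             if new_productions:
--                 new_grammar[symbol] = new_productions
--
--     return new_grammar
-- ===== SOURCE B (Python) =====
-- def delete_unreachable_symbols(grammar: dict[str, list[str]]) -> dict[str, list[str]]:
--     start_symbol = next(iter(grammar))
--
--     # Saturate the reachable set with whole-grammar passes until a fixpoint.
--     reachable = {start_symbol}
--     while True:
--         bigger = set(reachable)
--         for key, productions in grammar.items():
--             if key in reachable:
--                 for production in productions:
--                     for char in production:
--                         if char.isupper():
--                             bigger.add(char)
--         if bigger == reachable:
--             break
--         reachable = bigger
--
--     # Keep a symbol only with its surviving productions, as one comprehension.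
--     return {symbol: kept
--             for symbol, productions in grammar.items()
--             if symbol in reachable
--             and (kept := [p for p in productions
--                           if all(c in reachable or not c.isupper() for c in p)])}
-- ===== Notes on version B (the rewrite author's own statement) =====
-- stated objective: alternative
-- what changed: Phase 1 replaces A's explicit-stack DFS over symbols by repeated whole-grammar saturation passes iterated to a fixpoint, and phase 2 builds the result dict as a single comprehension instead of an insertion loop.
import Mathlib
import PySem

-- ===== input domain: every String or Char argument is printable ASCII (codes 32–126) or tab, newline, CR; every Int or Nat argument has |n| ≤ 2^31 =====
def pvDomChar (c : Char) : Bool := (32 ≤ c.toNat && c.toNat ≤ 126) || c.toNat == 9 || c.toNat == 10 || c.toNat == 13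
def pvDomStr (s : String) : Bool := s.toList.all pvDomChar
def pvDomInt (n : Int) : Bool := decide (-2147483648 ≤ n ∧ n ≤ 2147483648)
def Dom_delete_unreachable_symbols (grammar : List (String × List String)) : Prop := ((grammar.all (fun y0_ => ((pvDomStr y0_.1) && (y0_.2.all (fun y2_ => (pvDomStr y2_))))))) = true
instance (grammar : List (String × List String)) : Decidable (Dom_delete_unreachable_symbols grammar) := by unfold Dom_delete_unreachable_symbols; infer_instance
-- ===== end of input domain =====

-- B replaces A's explicit-stack DFS over symbols by whole-grammar saturation passes
-- iterated to a fixpoint, and builds the result dict as one comprehension (objective: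
-- alternative — same result, genuinely different traversal; no speed claim).

-- ===== PORT A =====

-- A's helper _processing_terminal_values: the uppercase characters (as 1-char strings)
-- of all productions of `symbol`, in order; empty when `symbol` is not a key.
def processing_terminal_values (grammar : List (String × List String)) (symbol : String) : List String :=
  match (PySem.Dict.mk grammar).get? symbol with
  | none => []
  | some prods =>
      prods.flatMap (fun production =>
        (production.toList.filter PySem.Chars.isupper).map (fun ch => String.ofList [ch]))

-- Termination measure for A's while-loop: total weight of grammar entries whose key is
-- not yet reachable, plus the stack length.
def pvMeasA (grammar : List (String × List String)) (r : PySem.Set String) (stack : List String) : Nat :=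
  ((grammar.filter (fun p => !(PySem.Set.contains r p.1))).map
     (fun p => 1 + (processing_terminal_values grammar p.1).length)).sum + stack.length

-- peel one entry with key `e.1` out of a weighted sum (termination helper)
theorem pvSumPeel (t : String × List String → Nat)
    (ht : ∀ p q : String × List String, p.1 = q.1 → t p = t q) :
    ∀ (m : List (String × List String)) (e : String × List String), e ∈ m →
      ((m.filter (fun p => !(p.1 == e.1))).map t).sum + t e ≤ (m.map t).sum := by
  intro m
  induction m with
  | nil => intro e he; cases he
  | cons a m ih =>
    intro e he
    by_cases hk : a.1 = e.1
    · have hta : t a = t e := ht a e hk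
      have h1 : List.filter (fun p => !(p.1 == e.1)) (a :: m)
          = List.filter (fun p => !(p.1 == e.1)) m := by
        simp [hk]
      have hsub : ((m.filter (fun p => !(p.1 == e.1))).map t).sum ≤ (m.map t).sum := by
        refine List.Sublist.sum_le_sum ?_ (by simp)
        exact (List.filter_sublist).map t
      rw [h1, List.map_cons, List.sum_cons]
      omega
    · have he' : e ∈ m := by
        rcases List.mem_cons.mp he with h | h
        · exact absurd (h ▸ rfl) hk
        · exact h
      have hbeq : (a.1 == e.1) = false := by simpa using hk
      have h1 : List.filter (fun p => !(p.1 == e.1)) (a :: m)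
          = a :: List.filter (fun p => !(p.1 == e.1)) m := by
        simp [hbeq]
      have := ih e he'
      rw [h1, List.map_cons, List.sum_cons, List.map_cons, List.sum_cons]
      omega

-- adding a non-reachable symbol pays for everything it pushes (termination helper)
theorem pvMeasA_key (g : List (String × List String)) (r : PySem.Set String) (symbol : String)
    (hns : PySem.Set.contains r symbol = false) :
    ((g.filter (fun p => !(PySem.Set.contains (PySem.Set.add r symbol) p.1))).map
       (fun p => 1 + (processing_terminal_values g p.1).length)).sum
      + (processing_terminal_values g symbol).length
      ≤ ((g.filter (fun p => !(PySem.Set.contains r p.1))).map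
           (fun p => 1 + (processing_terminal_values g p.1).length)).sum := by
  have hadd : ∀ p : String,
      PySem.Set.contains (PySem.Set.add r symbol) p
        = (PySem.Set.contains r p || (p == symbol)) := by
    intro p
    have h := PySem.Set.mem_add r symbol p
    cases hc : PySem.Set.contains r p <;> cases hb : (p == symbol) <;>
      cases hd : PySem.Set.contains (PySem.Set.add r symbol) p <;> simp_all
  have hfil : g.filter (fun p => !(PySem.Set.contains (PySem.Set.add r symbol) p.1))
      = (g.filter (fun p => !(PySem.Set.contains r p.1))).filter (fun p => !(p.1 == symbol)) := by
    rw [List.filter_filter]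
    refine List.filter_congr ?_
    intro a _
    rw [hadd a.1]
    cases PySem.Set.contains r a.1 <;> cases (a.1 == symbol) <;> rfl
  rw [hfil]
  by_cases hkey : symbol ∈ g.map Prod.fst
  · obtain ⟨e, he, hee⟩ := List.mem_map.mp hkey
    have hef : e ∈ g.filter (fun p => !(PySem.Set.contains r p.1)) := by
      refine List.mem_filter.mpr ⟨he, ?_⟩
      rw [hee, hns]; rfl
    have hpeel := pvSumPeel (fun p => 1 + (processing_terminal_values g p.1).length)
      (by intro p q hpq; simp only [hpq]) (g.filter (fun p => !(PySem.Set.contains r p.1))) e hef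
    simp only [hee] at hpeel
    omega
  · have hptv : processing_terminal_values g symbol = [] := by
      have hfind : List.find? (fun p => p.1 == symbol) g = none := by
        rw [List.find?_eq_none]
        intro a ha hbe
        exact hkey (by simpa [by simpa using hbe] using List.mem_map_of_mem (f := Prod.fst) ha)
      simp [processing_terminal_values, PySem.Dict.get?, hfind]
    have hsub : (((g.filter (fun p => !(PySem.Set.contains r p.1))).filter
          (fun p => !(p.1 == symbol))).map (fun p => 1 + (processing_terminal_values g p.1).length)).sum
        ≤ ((g.filter (fun p => !(PySem.Set.contains r p.1))).map
            (fun p => 1 + (processing_terminal_values g p.1).length)).sum := by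
      refine List.Sublist.sum_le_sum ?_ (by simp)
      exact (List.filter_sublist).map _
    rw [hptv]
    simpa using hsub

def loopA (grammar : List (String × List String)) (reachable : PySem.Set String)
    (stack : List String) : PySem.Set String :=
  match stack with
  | [] => reachable
  | x :: xs =>
      -- symbol = stack.pop()  (pop from the end)
      let symbol := (x :: xs).getLast (List.cons_ne_nil x xs)
      let rest := (x :: xs).dropLast
      if PySem.Set.contains reachable symbol then
        loopA grammar reachable rest
      else
        loopA grammar (PySem.Set.add reachable symbol)
          (rest ++ processing_terminal_values grammar symbol)
  termination_by pvMeasA grammar reachable stack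
  decreasing_by
  · simp only [pvMeasA, List.length_dropLast, List.length_cons]
    omega
  · rename_i hc
    simp only [pvMeasA, List.length_append, List.length_dropLast, List.length_cons]
    have := pvMeasA_key grammar reachable ((x :: xs).getLast (List.cons_ne_nil x xs))
      (by simpa using hc)
    omega

-- Port of A: stack-based reachability, then rebuild the dict entry by entry.
def delete_unreachable_symbols (grammar : List (String × List String)) : List (String × List String) :=
  match grammar with
  | [] => []   -- excluded by Pre_ (next(iter({})) raises StopIteration)
  | (s0, _) :: _ =>
      let reachable := loopA grammar PySem.Set.empty [s0]
      (grammar.foldl (fun new_grammar p =>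
        if PySem.Set.contains reachable p.1 then
          let new_productions := p.2.foldl (fun acc production =>
            if production.toList.all (fun ch =>
                 PySem.Set.contains reachable (String.ofList [ch]) || !(PySem.Chars.isupper ch)) then
              acc ++ [production]
            else acc) []
          if new_productions.isEmpty then new_grammar
          else PySem.Dict.insert new_grammar p.1 new_productions
        else new_grammar) (PySem.Dict.mk [])).items

-- ===== PORT B =====

-- one saturation pass: add every uppercase character of every production of a key
-- that is already reachable
def passB (grammar : List (String × List String)) (r : PySem.Set String) : PySem.Set String :=
  grammar.foldl (fun bigger p =>
    if PySem.Set.contains r p.1 then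
      p.2.foldl (fun b production =>
        production.toList.foldl (fun b2 ch =>
          if PySem.Chars.isupper ch then PySem.Set.add b2 (String.ofList [ch]) else b2) b) bigger
    else bigger) r

-- every symbol a pass can ever add
def candB (grammar : List (String × List String)) : List String :=
  grammar.flatMap (fun p => p.2.flatMap (fun production =>
    (production.toList.filter PySem.Chars.isupper).map (fun ch => String.ofList [ch])))

def pvMeasB (grammar : List (String × List String)) (r : PySem.Set String) : Nat :=
  ((PySem.Set.ofList (candB grammar)).filter (fun s => !(PySem.Set.contains r s))).length

-- membership is preserved by any foldl whose step preserves it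
theorem pvFoldlMono {α : Type} (f : PySem.Set String → α → PySem.Set String)
    (hf : ∀ s a x, x ∈ s → x ∈ f s a) :
    ∀ (l : List α) (s : PySem.Set String) (x : String), x ∈ s → x ∈ l.foldl f s := by
  intro l
  induction l with
  | nil => intro s x hx; exact hx
  | cons a l ih => intro s x hx; exact ih (f s a) x (hf s a x hx)

-- the character-level step of passB preserves membership
theorem pvCharStepMono (b : PySem.Set String) (ch : Char) (x : String) (hx : x ∈ b) :
    x ∈ (if PySem.Chars.isupper ch then PySem.Set.add b (String.ofList [ch]) else b) := by
  split
  · exact (PySem.Set.mem_add b (String.ofList [ch]) x).mpr (Or.inl hx)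
  · exact hx

-- the production-level step of passB preserves membership
theorem pvProdStepMono (b : PySem.Set String) (production : String) (x : String) (hx : x ∈ b) :
    x ∈ production.toList.foldl (fun b2 ch =>
      if PySem.Chars.isupper ch then PySem.Set.add b2 (String.ofList [ch]) else b2) b :=
  pvFoldlMono _ (fun s a y hy => pvCharStepMono s a y hy) production.toList b x hx

-- a pass only grows the set (termination helper, also used in the proofs)
theorem passB_mono (grammar : List (String × List String)) (r : PySem.Set String)
    (x : String) (hx : x ∈ r) : x ∈ passB grammar r := by
  refine pvFoldlMono _ ?_ grammar r x hx
  intro s p y hy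
  split
  · exact pvFoldlMono _ (fun b prod z hz => pvProdStepMono b prod z hz) p.2 s y hy
  · exact hy

-- character level: where an element of the inner fold comes from
theorem pvCharFoldSrc (cs : List Char) :
    ∀ (b : PySem.Set String) (x : String),
      x ∈ cs.foldl (fun b2 ch =>
        if PySem.Chars.isupper ch then PySem.Set.add b2 (String.ofList [ch]) else b2) b →
      x ∈ b ∨ ∃ c ∈ cs, PySem.Chars.isupper c ∧ x = String.ofList [c] := by
  induction cs with
  | nil => intro b x hx; exact Or.inl hx
  | cons c cs ih =>
    intro b x hx
    rcases ih _ x hx with h | ⟨c', hc', hu, he⟩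
    · beta_reduce at h
      by_cases hup : PySem.Chars.isupper c
      · rw [if_pos hup] at h
        rcases (PySem.Set.mem_add b (String.ofList [c]) x).mp h with h' | h'
        · exact Or.inl h'
        · exact Or.inr ⟨c, List.mem_cons_self, hup, h'⟩
      · rw [if_neg hup] at h
        exact Or.inl h
    · exact Or.inr ⟨c', List.mem_cons_of_mem c hc', hu, he⟩

-- production level
theorem pvProdFoldSrc (prods : List String) :
    ∀ (b : PySem.Set String) (x : String),
      x ∈ prods.foldl (fun b production =>
        production.toList.foldl (fun b2 ch =>
          if PySem.Chars.isupper ch then PySem.Set.add b2 (String.ofList [ch]) else b2) b) b →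
      x ∈ b ∨ ∃ production ∈ prods, ∃ c ∈ production.toList,
        PySem.Chars.isupper c ∧ x = String.ofList [c] := by
  induction prods with
  | nil => intro b x hx; exact Or.inl hx
  | cons p prods ih =>
    intro b x hx
    rcases ih _ x hx with h | ⟨p', hp', hrest⟩
    · beta_reduce at h
      rcases pvCharFoldSrc p.toList b x h with h' | ⟨c, hc, hu, he⟩
      · exact Or.inl h'
      · exact Or.inr ⟨p, List.mem_cons_self, c, hc, hu, he⟩
    · exact Or.inr ⟨p', List.mem_cons_of_mem p hp', hrest⟩

-- grammar level: anything in a pass is old or an uppercase character of a production of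
-- a key that was already reachable
theorem passB_full_src (r : PySem.Set String) :
    ∀ (l : List (String × List String)) (acc : PySem.Set String) (x : String),
      x ∈ l.foldl (fun bigger p =>
        if PySem.Set.contains r p.1 then
          p.2.foldl (fun b production =>
            production.toList.foldl (fun b2 ch =>
              if PySem.Chars.isupper ch then PySem.Set.add b2 (String.ofList [ch]) else b2) b) bigger
        else bigger) acc →
      x ∈ acc ∨ ∃ p ∈ l, PySem.Set.contains r p.1 = true ∧ ∃ production ∈ p.2,
        ∃ c ∈ production.toList, PySem.Chars.isupper c ∧ x = String.ofList [c] := by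
  intro l
  induction l with
  | nil => intro acc x hx; exact Or.inl hx
  | cons p l ih =>
    intro acc x hx
    rcases ih _ x hx with h | ⟨p', hp', hrest⟩
    · beta_reduce at h
      by_cases hc : PySem.Set.contains r p.1 = true
      · rw [if_pos hc] at h
        rcases pvProdFoldSrc p.2 acc x h with h' | ⟨prod, hprod, hrest'⟩
        · exact Or.inl h'
        · exact Or.inr ⟨p, List.mem_cons_self, hc, prod, hprod, hrest'⟩
      · rw [if_neg hc] at h
        exact Or.inl h
    · exact Or.inr ⟨p', List.mem_cons_of_mem p hp', hrest⟩

-- anything a pass adds is a candidate symbol (termination helper)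
theorem passB_src (grammar : List (String × List String)) (r : PySem.Set String)
    (x : String) (hx : x ∈ passB grammar r) : x ∈ r ∨ x ∈ candB grammar := by
  rcases passB_full_src r grammar r x hx with h | ⟨p, hp, _, production, hprod, c, hc, hu, he⟩
  · exact Or.inl h
  · refine Or.inr ?_
    simp only [candB, List.mem_flatMap, List.mem_map, List.mem_filter]
    exact ⟨p, hp, production, hprod, c, ⟨hc, hu⟩, he.symm⟩

theorem pvMeasB_dec (grammar : List (String × List String)) (r : PySem.Set String)
    (h : ¬ PySem.Set.equal (passB grammar r) r = true) :
    pvMeasB grammar (passB grammar r) < pvMeasB grammar r := by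
  have hmono : ∀ x ∈ r, x ∈ passB grammar r := fun x hx => passB_mono grammar r x hx
  -- the pass is not a subset of r, so some new x appears
  have hx : ∃ x ∈ passB grammar r, PySem.Set.contains r x = false := by
    by_contra hno
    push Not at hno
    apply h
    have h1 : PySem.Set.issubset (passB grammar r) r = true := by
      simp only [PySem.Set.issubset, List.all_eq_true]
      intro x hxm
      have := hno x hxm
      cases hc : PySem.Set.contains r x
      · exact absurd hc this
      · rfl
    have h2 : PySem.Set.issubset r (passB grammar r) = true := by
      simp only [PySem.Set.issubset, List.all_eq_true]
      intro x hxm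
      exact (PySem.Set.contains_iff _ _).mpr (hmono x hxm)
    simp [PySem.Set.equal, h1, h2]
  obtain ⟨x, hxp, hxr⟩ := hx
  have hxnr : x ∉ r := by
    intro hm
    rw [(PySem.Set.contains_iff r x).mpr hm] at hxr
    exact Bool.noConfusion hxr
  have hxc : x ∈ candB grammar := by
    rcases passB_src grammar r x hxp with h' | h'
    · exact absurd h' hxnr
    · exact h'
  have hsub : ((PySem.Set.ofList (candB grammar)).filter
        (fun s => !(PySem.Set.contains (passB grammar r) s))).Sublist
      ((PySem.Set.ofList (candB grammar)).filter (fun s => !(PySem.Set.contains r s))) := by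
    refine List.monotone_filter_right _ ?_
    intro y hy
    by_cases hcr : y ∈ r
    · have hcp : PySem.Set.contains (passB grammar r) y = true :=
        (PySem.Set.contains_iff _ y).mpr (hmono y hcr)
      rw [hcp] at hy
      exact absurd hy (by simp)
    · simpa using hcr
  have hne : ((PySem.Set.ofList (candB grammar)).filter
        (fun s => !(PySem.Set.contains (passB grammar r) s)))
      ≠ ((PySem.Set.ofList (candB grammar)).filter (fun s => !(PySem.Set.contains r s))) := by
    intro heq
    have hxin : x ∈ (PySem.Set.ofList (candB grammar)).filter
        (fun s => !(PySem.Set.contains r s)) := by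
      refine List.mem_filter.mpr ⟨(PySem.Set.mem_ofList _ _).mpr hxc, by simpa using hxnr⟩
    rw [← heq] at hxin
    have := (List.mem_filter.mp hxin).2
    simp at this
    exact this hxp
  exact lt_of_le_of_ne hsub.length_le (fun he => hne (hsub.eq_of_length he))

-- iterate passes to a fixpoint
def iterB (grammar : List (String × List String)) (r : PySem.Set String) : PySem.Set String :=
  if h : PySem.Set.equal (passB grammar r) r then r
  else iterB grammar (passB grammar r)
  termination_by pvMeasB grammar r
  decreasing_by exact pvMeasB_dec grammar r h

-- Port of B: saturation to a fixpoint, result built as one comprehension (filterMap).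
def delete_unreachable_symbols_alt (grammar : List (String × List String)) : List (String × List String) :=
  match grammar with
  | [] => []   -- excluded by Pre_ (next(iter({})) raises StopIteration)
  | (s0, _) :: _ =>
      let reachable := iterB grammar (PySem.Set.ofList [s0])
      grammar.filterMap (fun p =>
        if PySem.Set.contains reachable p.1 then
          let kept := p.2.filter (fun production =>
            production.toList.all (fun ch =>
              PySem.Set.contains reachable (String.ofList [ch]) || !(PySem.Chars.isupper ch)))
          if kept = [] then none else some (p.1, kept)
        else none)

-- ===== PRECONDITION & SPEC =====
-- Pre_ excludes the empty grammar, on which A raises StopIteration (next(iter(grammar))),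
-- and association lists with duplicate keys, which no Python dict argument can represent.
def Pre_delete_unreachable_symbols (grammar : List (String × List String)) : Prop :=
  grammar ≠ [] ∧ (grammar.map Prod.fst).Nodup
instance (grammar : List (String × List String)) : Decidable (Pre_delete_unreachable_symbols grammar) := by unfold Pre_delete_unreachable_symbols; infer_instance

def pvWitness_delete_unreachable_symbols : (List (String × List String)) :=
  [("S", ["Ab", "B"]), ("A", ["a"]), ("B", [])]

def Spec_delete_unreachable_symbols (grammar : List (String × List String)) (out : List (String × List String)) : Prop := out = delete_unreachable_symbols_alt grammar
instance (grammar : List (String × List String)) (out : List (String × List String)) : Decidable (Spec_delete_unreachable_symbols grammar out) := by unfold Spec_delete_unreachable_symbols; infer_instance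

-- ===== CLAIM (what is proved, stated in full; the proofs are below) =====
def Claim_equal_delete_unreachable_symbols : Prop := ∀ (grammar : List (String × List String)), Dom_delete_unreachable_symbols grammar → Pre_delete_unreachable_symbols grammar → Spec_delete_unreachable_symbols grammar (delete_unreachable_symbols grammar)

-- ===== LEMMAS AND PROOFS =====

-- the reachability relation both phase-1 computations realise
inductive pvReach (g : List (String × List String)) (start : String) : String → Prop
  | base : pvReach g start start
  | step {s t : String} : pvReach g start s → t ∈ processing_terminal_values g s →
      pvReach g start t

-- decompose a nonempty stack into dropLast and getLast
theorem pvStackMem (x : String) (xs : List String) (t : String) (ht : t ∈ x :: xs) :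
    t ∈ (x :: xs).dropLast ∨ t = (x :: xs).getLast (List.cons_ne_nil x xs) := by
  have hd := List.dropLast_concat_getLast (List.cons_ne_nil x xs)
  rw [← hd] at ht
  rcases List.mem_append.mp ht with h | h
  · exact Or.inl h
  · exact Or.inr (by simpa using h)

theorem loopA_sound (g : List (String × List String)) (P : String → Prop)
    (hstep : ∀ s t, P s → t ∈ processing_terminal_values g s → P t) :
    ∀ (r : PySem.Set String) (stack : List String),
      (∀ x ∈ r, P x) → (∀ x ∈ stack, P x) → ∀ x ∈ loopA g r stack, P x := by
  intro r stack
  fun_induction loopA g r stack with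
  | case1 r => intro hr _ x hx; exact hr x hx
  | case2 r x xs symbol rest h ih =>
      intro hr hs y hy
      exact ih hr (fun z hz => hs z ((List.dropLast_sublist (x :: xs)).subset hz)) y hy
  | case3 r x xs symbol rest h ih =>
      intro hr hs y hy
      have hsym : P ((x :: xs).getLast (List.cons_ne_nil x xs)) :=
        hs _ (List.getLast_mem _)
      refine ih ?_ ?_ y hy
      · intro z hz
        rcases (PySem.Set.mem_add _ _ z).mp hz with h' | h'
        · exact hr z h'
        · exact h' ▸ hsym
      · intro z hz
        rcases List.mem_append.mp hz with h' | h'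
        · exact hs z ((List.dropLast_sublist (x :: xs)).subset h')
        · exact hstep _ z hsym h'

theorem loopA_closed (g : List (String × List String)) (start : String) :
    ∀ (r : PySem.Set String) (stack : List String),
      (start ∈ r ∨ start ∈ stack) →
      (∀ s ∈ r, ∀ t ∈ processing_terminal_values g s, t ∈ r ∨ t ∈ stack) →
      start ∈ loopA g r stack ∧
        ∀ s ∈ loopA g r stack, ∀ t ∈ processing_terminal_values g s, t ∈ loopA g r stack := by
  intro r stack
  fun_induction loopA g r stack with
  | case1 r =>
      intro hst hcl
      refine ⟨?_, ?_⟩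
      · rcases hst with h | h
        · exact h
        · cases h
      · intro s hs t ht
        rcases hcl s hs t ht with h | h
        · exact h
        · cases h
  | case2 r x xs symbol rest h ih =>
      intro hst hcl
      refine ih ?_ ?_
      · rcases hst with h' | h'
        · exact Or.inl h'
        · rcases pvStackMem x xs start h' with h'' | h''
          · exact Or.inr h''
          · exact Or.inl (h'' ▸ (PySem.Set.contains_iff _ _).mp h)
      · intro s hs t ht
        rcases hcl s hs t ht with h' | h'
        · exact Or.inl h'
        · rcases pvStackMem x xs t h' with h'' | h''
          · exact Or.inr h''
          · exact Or.inl (h'' ▸ (PySem.Set.contains_iff _ _).mp h)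
  | case3 r x xs symbol rest h ih =>
      intro hst hcl
      refine ih ?_ ?_
      · rcases hst with h' | h'
        · exact Or.inl ((PySem.Set.mem_add _ _ _).mpr (Or.inl h'))
        · rcases pvStackMem x xs start h' with h'' | h''
          · exact Or.inr (List.mem_append.mpr (Or.inl h''))
          · exact Or.inl ((PySem.Set.mem_add _ _ _).mpr (Or.inr h''))
      · intro s hs t ht
        rcases (PySem.Set.mem_add _ _ s).mp hs with h' | h'
        · rcases hcl s h' t ht with h'' | h''
          · exact Or.inl ((PySem.Set.mem_add _ _ _).mpr (Or.inl h''))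
          · rcases pvStackMem x xs t h'' with h3 | h3
            · exact Or.inr (List.mem_append.mpr (Or.inl h3))
            · exact Or.inl ((PySem.Set.mem_add _ _ _).mpr (Or.inr h3))
        · refine Or.inr (List.mem_append.mpr (Or.inr ?_))
          rw [← h']
          exact ht

theorem memA_iff (g : List (String × List String)) (s0 x : String) :
    x ∈ loopA g PySem.Set.empty [s0] ↔ pvReach g s0 x := by
  constructor
  · intro hx
    refine loopA_sound g (pvReach g s0)
      (fun s t hs ht => pvReach.step hs ht) PySem.Set.empty [s0] ?_ ?_ x hx
    · intro z hz; cases hz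
    · intro z hz
      have hzs : z = s0 := by simpa using hz
      exact hzs ▸ pvReach.base
  · intro hx
    obtain ⟨hstart, hclosed⟩ := loopA_closed g s0 PySem.Set.empty [s0]
      (Or.inr (List.mem_cons_self)) (fun s hs => absurd hs (by simp [PySem.Set.empty]))
    induction hx with
    | base => exact hstart
    | step hr ht ih => exact hclosed _ ih _ ht

-- first-match lookup on a Nodup association list finds exactly the list entry
theorem pvFindNodup (g : List (String × List String)) (hN : (g.map Prod.fst).Nodup) :
    ∀ p ∈ g, List.find? (fun q => q.1 == p.1) g = some p := by
  induction g with
  | nil => intro p hp; cases hp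
  | cons a g ih =>
      intro p hp
      rw [List.map_cons] at hN
      have hN' := List.nodup_cons.mp hN
      rcases List.mem_cons.mp hp with h | h
      · rw [h]
        exact List.find?_cons_of_pos (by simp)
      · have hb : (a.1 == p.1) = false := by
          cases hbe : (a.1 == p.1)
          · rfl
          · have : p.1 ∈ g.map Prod.fst := List.mem_map_of_mem h
            exact absurd ((by simpa using hbe) ▸ this) hN'.1
        simp only [List.find?_cons, hb]
        exact ih hN'.2 p h

theorem pvGetNodup (g : List (String × List String)) (hN : (g.map Prod.fst).Nodup)
    (p : String × List String) (hp : p ∈ g) :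
    (PySem.Dict.mk g).get? p.1 = some p.2 := by
  simp [PySem.Dict.get?, pvFindNodup g hN p hp]

-- membership in processing_terminal_values, unfolded
theorem pvPtvMem (g : List (String × List String)) (s t : String) :
    t ∈ processing_terminal_values g s ↔
      ∃ prods, (PySem.Dict.mk g).get? s = some prods ∧ ∃ production ∈ prods,
        ∃ c ∈ production.toList, PySem.Chars.isupper c = true ∧ t = String.ofList [c] := by
  unfold processing_terminal_values
  cases hg : (PySem.Dict.mk g).get? s with
  | none => simp
  | some prods =>
      simp only [List.mem_flatMap, List.mem_map, List.mem_filter, Option.some.injEq]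
      constructor
      · rintro ⟨production, hprod, c, ⟨hc, hu⟩, he⟩
        exact ⟨prods, rfl, production, hprod, c, hc, hu, he.symm⟩
      · rintro ⟨prods', hpe, production, hprod, c, hc, hu, he⟩
        cases hpe
        exact ⟨production, hprod, c, ⟨hc, hu⟩, he.symm⟩

theorem iterB_mono (g : List (String × List String)) :
    ∀ (r : PySem.Set String) (x : String), x ∈ r → x ∈ iterB g r := by
  intro r
  fun_induction iterB g r with
  | case1 r h => intro x hx; exact hx
  | case2 r h ih => intro x hx; exact ih x (passB_mono g r x hx)

theorem passB_sound (g : List (String × List String)) (hN : (g.map Prod.fst).Nodup)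
    (P : String → Prop) (hstep : ∀ s t, P s → t ∈ processing_terminal_values g s → P t)
    (r : PySem.Set String) (hr : ∀ x ∈ r, P x) : ∀ x ∈ passB g r, P x := by
  intro x hx
  rcases passB_full_src r g r x hx with h | ⟨p, hp, hcp, production, hprod, c, hc, hu, he⟩
  · exact hr x h
  · have hkey : P p.1 := hr p.1 ((PySem.Set.contains_iff r p.1).mp hcp)
    refine hstep p.1 x hkey ?_
    exact (pvPtvMem g p.1 x).mpr ⟨p.2, pvGetNodup g hN p hp, production, hprod, c, hc, hu, he⟩

theorem iterB_sound (g : List (String × List String)) (hN : (g.map Prod.fst).Nodup)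
    (P : String → Prop) (hstep : ∀ s t, P s → t ∈ processing_terminal_values g s → P t) :
    ∀ (r : PySem.Set String), (∀ x ∈ r, P x) → ∀ x ∈ iterB g r, P x := by
  intro r
  fun_induction iterB g r with
  | case1 r h => intro hr x hx; exact hr x hx
  | case2 r h ih => intro hr x hx; exact ih (passB_sound g hN P hstep r hr) x hx

theorem iterB_fix (g : List (String × List String)) :
    ∀ (r : PySem.Set String), PySem.Set.equal (passB g (iterB g r)) (iterB g r) = true := by
  intro r
  fun_induction iterB g r with
  | case1 r h => exact h
  | case2 r h ih => exact ih

-- the character-level fold reaches every uppercase character it is given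
theorem pvCharFoldAdd (cs : List Char) :
    ∀ (b : PySem.Set String) (c : Char), c ∈ cs → PySem.Chars.isupper c = true →
      String.ofList [c] ∈ cs.foldl (fun b2 ch =>
        if PySem.Chars.isupper ch then PySem.Set.add b2 (String.ofList [ch]) else b2) b := by
  induction cs with
  | nil => intro b c hc; cases hc
  | cons c0 cs ih =>
      intro b c hc hu
      rcases List.mem_cons.mp hc with h | h
      · subst h
        rw [List.foldl_cons]
        refine pvFoldlMono _ (fun s a y hy => pvCharStepMono s a y hy) cs _ _ ?_
        rw [if_pos hu]
        exact (PySem.Set.mem_add _ _ _).mpr (Or.inr rfl)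
      · exact ih _ c h hu

theorem pvProdFoldAdd (prods : List String) :
    ∀ (b : PySem.Set String) (production : String) (c : Char),
      production ∈ prods → c ∈ production.toList → PySem.Chars.isupper c = true →
      String.ofList [c] ∈ prods.foldl (fun b production =>
        production.toList.foldl (fun b2 ch =>
          if PySem.Chars.isupper ch then PySem.Set.add b2 (String.ofList [ch]) else b2) b) b := by
  induction prods with
  | nil => intro b production c h; cases h
  | cons p prods ih =>
      intro b production c hprod hc hu
      rcases List.mem_cons.mp hprod with h | h
      · subst h
        rw [List.foldl_cons]
        refine pvFoldlMono _ (fun s a y hy => pvProdStepMono s a y hy) prods _ _ ?_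
        exact pvCharFoldAdd production.toList b c hc hu
      · exact ih _ production c h hc hu

-- a pass picks up every uppercase character of every production of a reachable entry
theorem passB_entry (r : PySem.Set String) :
    ∀ (l : List (String × List String)) (acc : PySem.Set String)
      (p : String × List String) (production : String) (c : Char),
      p ∈ l → PySem.Set.contains r p.1 = true → production ∈ p.2 →
      c ∈ production.toList → PySem.Chars.isupper c = true →
      String.ofList [c] ∈ l.foldl (fun bigger q =>
        if PySem.Set.contains r q.1 then
          q.2.foldl (fun b production =>
            production.toList.foldl (fun b2 ch =>
              if PySem.Chars.isupper ch then PySem.Set.add b2 (String.ofList [ch]) else b2) b) bigger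
        else bigger) acc := by
  intro l
  induction l with
  | nil => intro acc p production c h; cases h
  | cons q l ih =>
      intro acc p production c hp hcp hprod hc hu
      rcases List.mem_cons.mp hp with h | h
      · subst h
        rw [List.foldl_cons]
        refine pvFoldlMono _ ?_ l _ _ ?_
        · intro s a y hy
          beta_reduce
          split
          · exact pvFoldlMono _ (fun b prod z hz => pvProdStepMono b prod z hz) a.2 s y hy
          · exact hy
        · beta_reduce
          rw [if_pos hcp]
          exact pvProdFoldAdd p.2 acc production c hprod hc hu
      · exact ih _ p production c h hcp hprod hc hu

theorem memB_iff (g : List (String × List String)) (hN : (g.map Prod.fst).Nodup)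
    (s0 x : String) :
    x ∈ iterB g (PySem.Set.ofList [s0]) ↔ pvReach g s0 x := by
  constructor
  · intro hx
    refine iterB_sound g hN (pvReach g s0) (fun s t hs ht => pvReach.step hs ht)
      (PySem.Set.ofList [s0]) ?_ x hx
    intro z hz
    have : z = s0 := by simpa using (PySem.Set.mem_ofList _ z).mp hz
    exact this ▸ pvReach.base
  · intro hx
    have hstart : s0 ∈ iterB g (PySem.Set.ofList [s0]) :=
      iterB_mono g _ s0 ((PySem.Set.mem_ofList _ s0).mpr (by simp))
    have hclosed : ∀ s ∈ iterB g (PySem.Set.ofList [s0]),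
        ∀ t ∈ processing_terminal_values g s, t ∈ iterB g (PySem.Set.ofList [s0]) := by
      intro s hs t ht
      set c := iterB g (PySem.Set.ofList [s0]) with hcdef
      have hfix := iterB_fix g (PySem.Set.ofList [s0])
      -- t lands in passB g c
      obtain ⟨prods, hget, production, hprod, ch, hch, hu, he⟩ := (pvPtvMem g s t).mp ht
      obtain ⟨e, hee⟩ : ∃ e, List.find? (fun q => q.1 == s) g = some e := by
        cases hf : List.find? (fun q => q.1 == s) g with
        | none => rw [PySem.Dict.get?] at hget; rw [hf] at hget; cases hget
        | some e => exact ⟨e, rfl⟩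
      have heg : e ∈ g := List.mem_of_find?_eq_some hee
      have hek : e.1 = s := by simpa using List.find?_some hee
      have hev : e.2 = prods := by
        rw [PySem.Dict.get?, hee] at hget
        simpa using hget
      have htp : t ∈ passB g c := by
        rw [he]
        refine passB_entry c g c e production ch heg ?_ (hev ▸ hprod) hch hu
        exact (PySem.Set.contains_iff c e.1).mpr (hek ▸ hs)
      -- and passB g c ⊆ c by the fixpoint property
      have hsub : PySem.Set.issubset (passB g c) c = true := by
        have hf2 := hfix
        rw [PySem.Set.equal] at hf2
        cases hps : PySem.Set.issubset (passB g c) c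
        · rw [hps] at hf2; simp at hf2
        · rfl
      rw [PySem.Set.issubset, List.all_eq_true] at hsub
      exact (PySem.Set.contains_iff c t).mp (hsub t htp)
    induction hx with
    | base => exact hstart
    | step hr ht ih => exact hclosed _ ih _ ht

-- phase 2: A's dict-insertion fold equals B's comprehension, given equal membership
theorem pvPhase2 (rA rB : PySem.Set String)
    (hc : ∀ x : String, PySem.Set.contains rA x = PySem.Set.contains rB x) :
    ∀ (l : List (String × List String)) (acc : PySem.Dict String (List String)),
      (l.map Prod.fst).Nodup →
      (∀ k ∈ l.map Prod.fst, acc.contains k = false) →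
      (l.foldl (fun new_grammar p =>
        if PySem.Set.contains rA p.1 then
          let new_productions := p.2.foldl (fun acc2 production =>
            if production.toList.all (fun ch =>
                 PySem.Set.contains rA (String.ofList [ch]) || !(PySem.Chars.isupper ch)) then
              acc2 ++ [production]
            else acc2) []
          if new_productions.isEmpty then new_grammar
          else PySem.Dict.insert new_grammar p.1 new_productions
        else new_grammar) acc).items
      = acc.items ++ l.filterMap (fun p =>
          if PySem.Set.contains rB p.1 then
            let kept := p.2.filter (fun production =>
              production.toList.all (fun ch =>
                PySem.Set.contains rB (String.ofList [ch]) || !(PySem.Chars.isupper ch)))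
            if kept = [] then none else some (p.1, kept)
          else none) := by
  intro l
  induction l with
  | nil => intro acc _ _; simp
  | cons p l ih =>
      intro acc hN hacc
      rw [List.map_cons] at hN
      have hhead : p.1 ∉ l.map Prod.fst := (List.nodup_cons.mp hN).1
      have hNl : (l.map Prod.fst).Nodup := (List.nodup_cons.mp hN).2
      have hnp : p.2.foldl (fun acc2 production =>
            if production.toList.all (fun ch =>
                 PySem.Set.contains rA (String.ofList [ch]) || !(PySem.Chars.isupper ch)) then
              acc2 ++ [production]
            else acc2) []
          = p.2.filter (fun production =>
              production.toList.all (fun ch =>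
                PySem.Set.contains rB (String.ofList [ch]) || !(PySem.Chars.isupper ch))) := by
        have := PySem.List.foldl_append_if
          (fun production => production.toList.all (fun ch =>
            PySem.Set.contains rA (String.ofList [ch]) || !(PySem.Chars.isupper ch)))
          (fun production => production) p.2 []
        rw [this, List.map_id', List.nil_append]
        refine List.filter_congr ?_
        intro a _
        refine congrArg a.toList.all ?_
        funext ch
        rw [hc (String.ofList [ch])]
      rw [List.foldl_cons, List.filterMap_cons]
      by_cases hcp : PySem.Set.contains rA p.1 = true
      · have hcpB : PySem.Set.contains rB p.1 = true := by rw [← hc p.1]; exact hcp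
        by_cases hk : (p.2.filter (fun production =>
            production.toList.all (fun ch =>
              PySem.Set.contains rB (String.ofList [ch]) || !(PySem.Chars.isupper ch)))) = []
        · simp only [hcp, hcpB, if_true, hnp, hk, List.isEmpty_nil]
          exact ih acc hNl (fun k hk' => hacc k (List.mem_cons_of_mem _ hk'))
        · have haccp : acc.contains p.1 = false := hacc p.1 (by simp)
          have hins := PySem.Dict.items_insert_of_not_contains acc
            (p.2.filter (fun production =>
              production.toList.all (fun ch =>
                PySem.Set.contains rB (String.ofList [ch]) || !(PySem.Chars.isupper ch)))) haccp
          have hkB : (p.2.filter (fun production =>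
              production.toList.all (fun ch =>
                PySem.Set.contains rB (String.ofList [ch]) || !(PySem.Chars.isupper ch)))).isEmpty = false := by
            cases hkk : (p.2.filter (fun production =>
              production.toList.all (fun ch =>
                PySem.Set.contains rB (String.ofList [ch]) || !(PySem.Chars.isupper ch)))) with
            | nil => exact absurd hkk hk
            | cons a l' => rfl
          simp only [hcp, hcpB, if_true, hnp, hkB, Bool.false_eq_true, ite_false, hk]
          have hfresh : ∀ k ∈ l.map Prod.fst,
              (acc.insert p.1 (p.2.filter (fun production =>
                production.toList.all (fun ch =>
                  PySem.Set.contains rB (String.ofList [ch]) || !(PySem.Chars.isupper ch))))).contains k = false := by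
            intro k hk'
            rw [PySem.Dict.contains, hins, List.any_append]
            have hkne : ¬(p.1 == k) = true := by
              intro hbe
              exact hhead ((by simpa using hbe) ▸ hk')
            have h1 : acc.items.any (fun q => q.1 == k) = false := by
              have := hacc k (List.mem_cons_of_mem _ hk')
              rw [PySem.Dict.contains] at this
              exact this
            rw [h1]
            simp only [List.any_cons, List.any_nil, Bool.or_false, Bool.false_or]
            simpa using hkne
          rw [ih _ hNl hfresh, hins]
          simp
      · have hcpB : PySem.Set.contains rB p.1 = false := by rw [← hc p.1]; simpa using hcp
        simp only [hcp, hcpB, Bool.false_eq_true, if_false]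
        exact ih acc hNl (fun k hk' => hacc k (List.mem_cons_of_mem _ hk'))

-- ===== VERDICT (by name: the statement is the Claim_ definition above) =====
theorem delete_unreachable_symbols_spec : Claim_equal_delete_unreachable_symbols := by
  intro grammar _ hpre
  unfold Spec_delete_unreachable_symbols
  obtain ⟨hne, hN⟩ := hpre
  match grammar, hne with
  | (s0, prods0) :: rest, _ =>
    set g : List (String × List String) := (s0, prods0) :: rest with hg
    have hmem : ∀ x : String,
        PySem.Set.contains (loopA g PySem.Set.empty [s0]) x
          = PySem.Set.contains (iterB g (PySem.Set.ofList [s0])) x := by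
      intro x
      have hiff : x ∈ loopA g PySem.Set.empty [s0] ↔ x ∈ iterB g (PySem.Set.ofList [s0]) :=
        (memA_iff g s0 x).trans (memB_iff g hN s0 x).symm
      cases hA : PySem.Set.contains (loopA g PySem.Set.empty [s0]) x with
      | true =>
          exact ((PySem.Set.contains_iff _ x).mpr
            (hiff.mp ((PySem.Set.contains_iff _ x).mp hA))).symm
      | false =>
          cases hB : PySem.Set.contains (iterB g (PySem.Set.ofList [s0])) x with
          | true =>
              rw [(PySem.Set.contains_iff _ x).mpr
                (hiff.mpr ((PySem.Set.contains_iff _ x).mp hB))] at hA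
              exact Bool.noConfusion hA
          | false => rfl
    show delete_unreachable_symbols g = delete_unreachable_symbols_alt g
    unfold delete_unreachable_symbols delete_unreachable_symbols_alt
    simp only []
    have := pvPhase2 (loopA g PySem.Set.empty [s0]) (iterB g (PySem.Set.ofList [s0])) hmem
      g (PySem.Dict.mk []) hN (by intro k _; rfl)
    simpa using this
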